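-- pv_equiv track=rewrite | github.com/rsasaki0109/CudaRobotics | scripts/render_design_convergence.py | leader_change_count
-- ===== SOURCE A (Python) =====
-- def leader_change_count(items: list[str]) -> int:
--     if len(items) < 2:
--         return 0
--     changes = 0
--     previous = items[0]
--     for item in items[1:]:
--         if item != previous:
--             changes += 1
--             previous = item
--     return changes
-- ===== SOURCE B (Python) =====
-- from itertools import groupby
--
-- def leader_change_count(items: list[str]) -> int:
--     if len(items) < 2:
--         return 0
--     runs = sum(1 for _ in groupby(items))
--     return runs - 1
-- ===== Notes on version B (the rewrite author's own statement) =====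
-- stated objective: idiomatic
-- what changed: B collapses the list into maximal runs of equal consecutive elements with itertools.groupby and returns runs-1, instead of tracking a 'previous' value and incrementing a counter on each change.
import Mathlib
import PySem

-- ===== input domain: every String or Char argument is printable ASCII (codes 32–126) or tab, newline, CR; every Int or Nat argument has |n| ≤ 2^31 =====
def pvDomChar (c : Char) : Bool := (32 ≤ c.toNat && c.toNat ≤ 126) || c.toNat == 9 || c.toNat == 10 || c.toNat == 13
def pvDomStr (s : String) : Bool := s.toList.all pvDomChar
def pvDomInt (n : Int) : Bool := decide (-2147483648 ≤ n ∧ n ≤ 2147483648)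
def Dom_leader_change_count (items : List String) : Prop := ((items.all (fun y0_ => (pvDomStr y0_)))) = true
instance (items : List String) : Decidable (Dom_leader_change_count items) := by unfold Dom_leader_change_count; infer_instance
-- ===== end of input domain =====

-- B counts maximal runs of equal consecutive elements (groupby) and returns runs-1; idiomatic, same cost.

-- ===== PORT A =====
-- the loop 'for item in items[1:]' with state (changes, previous)
def pvLoopA (previous : String) (changes : Int) : List String → Int
  | [] => changes
  | item :: rest =>
    if item ≠ previous then pvLoopA item (changes + 1) rest
    else pvLoopA previous changes rest

def leader_change_count (items : List String) : Int :=
  if items.length < 2 then 0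
  else
    match items with
    | [] => 0
    | x :: rest => pvLoopA x 0 rest

-- ===== PORT B =====
-- number of groups produced by itertools.groupby(items)
def pvRuns : List String → Int
  | [] => 0
  | [_] => 1
  | x :: y :: t => (if x = y then 0 else 1) + pvRuns (y :: t)

def leader_change_count_alt (items : List String) : Int :=
  if items.length < 2 then 0
  else pvRuns items - 1

-- ===== PRECONDITION & SPEC =====
def Spec_leader_change_count (items : List String) (out : Int) : Prop := out = leader_change_count_alt items
instance (items : List String) (out : Int) : Decidable (Spec_leader_change_count items out) := by unfold Spec_leader_change_count; infer_instance

-- ===== CLAIM (what is proved, stated in full; the proofs are below) =====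
def Claim_equal_leader_change_count : Prop := ∀ (items : List String), Dom_leader_change_count items → Spec_leader_change_count items (leader_change_count items)

-- ===== LEMMAS AND PROOFS =====
theorem pvLoopA_eq_runs (rest : List String) : ∀ (previous : String) (changes : Int),
    pvLoopA previous changes rest = changes + pvRuns (previous :: rest) - 1 := by
  induction rest with
  | nil => intro p c; simp [pvLoopA, pvRuns]
  | cons y t ih =>
    intro p c
    by_cases h : y = p
    · subst h
      simp [pvLoopA, pvRuns, ih]
    · simp [pvLoopA, pvRuns, h, Ne.symm h, ih]
      omega

-- ===== VERDICT (by name: the statement is the Claim_ definition above) =====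
theorem leader_change_count_spec : Claim_equal_leader_change_count := by
  intro items _
  unfold Spec_leader_change_count leader_change_count leader_change_count_alt
  split
  · rfl
  · match items with
    | [] => simp_all
    | x :: rest => simp [pvLoopA_eq_runs]
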